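-- pv_equiv track=rewrite | github.com/pypi-data/pypi-mirror-42 | packages/joho/joho-0.19.3.tar.gz/joho-0.19.3/joho/joho.py | IsWithinQuote
-- ===== SOURCE A (Python) =====
-- def GetQuotePosition(S, quote):
--     pos = []
--     n  = S.find(quote)
--     while n != -1:
--         pos += [n]
--         n  = S.find(quote, n+1)
--     return pos
--
-- def GetQuotePair(S, quote):
--     pair = []
--     pos = GetQuotePosition(S, quote)
--     for i in range(int(len(pos)/2)):
--         pair += [ (pos[2*i], pos[2*i + 1]) ]
--     return pair
--
-- def IsWithinQuote(n, S, quote):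
--     """
--     Check if the character pointed by index n
--     is within the Quoation pair.
--     e.g. say S : ab"cd"
--     IsWithinQuote(1, S) = False
--     IsWithinQuote(4, S) = True
--     """
--     quote_pair= GetQuotePair(S, quote)
--     WithinQuote = False
--     if len(quote_pair) != 0:
--         for q in quote_pair:
--             if n > q[0] and n < q[1]:
--                 WithinQuote = True
--                 break
--     return WithinQuote
-- ===== SOURCE B (Python) =====
-- def IsWithinQuote(n, S, quote):
--     """
--     Check if the character pointed by index n
--     is within the Quoation pair.
--     Single pass over the quote occurrences, counting parity instead of
--     materialising position/pair lists.
--     """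
--     before = 0      # occurrences strictly left of n
--     after = 0       # occurrences strictly right of n
--     at = False      # an occurrence exactly at n
--     i = S.find(quote)
--     while i != -1:
--         if i < n:
--             before += 1
--         elif i == n:
--             at = True
--         else:
--             after += 1
--         i = S.find(quote, i + 1)
--     return (not at) and before % 2 == 1 and after > 0
-- ===== Notes on version B (the rewrite author's own statement) =====
-- stated objective: alternative
-- what changed: B replaces A's three-stage pipeline (build the list of all quote positions, pair them up by index, scan the pairs for containment) with a single counting pass over the occurrences that keeps only three scalars (quotes before n, quotes after n, quote at n) and decides membership by parity: inside iff no quote sits at n, an odd number of quotes precede n and at least one follows it.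
import Mathlib
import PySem

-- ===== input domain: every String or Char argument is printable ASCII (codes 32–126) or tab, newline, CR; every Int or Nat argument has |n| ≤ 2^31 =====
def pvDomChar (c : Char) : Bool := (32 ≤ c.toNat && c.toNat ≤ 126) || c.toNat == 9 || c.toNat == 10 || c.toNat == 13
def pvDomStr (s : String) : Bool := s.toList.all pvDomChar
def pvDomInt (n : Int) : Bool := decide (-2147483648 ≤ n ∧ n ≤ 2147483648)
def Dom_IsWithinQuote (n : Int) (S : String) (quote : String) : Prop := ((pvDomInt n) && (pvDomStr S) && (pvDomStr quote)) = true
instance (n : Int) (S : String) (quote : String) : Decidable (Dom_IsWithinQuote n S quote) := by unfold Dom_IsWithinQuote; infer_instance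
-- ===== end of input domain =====

-- B replaces A's positions-list/pairs-list construction and pair scan with a single
-- counting pass (quotes before n, at n, after n) deciding membership by parity.


-- ===== PORT A =====
-- the while-loop of GetQuotePosition; fuel = S.length + 2 bounds its iteration count
def findLoopA (S quote : String) (fuel : Nat) (i : Int) (pos : List Int) : List Int :=
  match fuel with
  | 0 => pos
  | f + 1 =>
    if i = -1 then pos
    else findLoopA S quote f (PySem.Str.findFrom S quote (i + 1)) (pos ++ [i])

def GetQuotePosition (S quote : String) : List Int :=
  findLoopA S quote (S.toList.length + 2) (PySem.Str.find S quote) []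

def GetQuotePair (S quote : String) : List (Int × Int) :=
  let pos := GetQuotePosition S quote
  (PySem.List.pyRange 0 (pos.length / 2 : Nat)).foldl
    (fun pair i => pair ++ [(PySem.List.pyGetD pos (2 * i) 0, PySem.List.pyGetD pos (2 * i + 1) 0)]) []

-- the for-loop of IsWithinQuote (break = return true)
def withinLoopA (n : Int) : List (Int × Int) → Bool
  | [] => false
  | q :: rest => if n > q.1 ∧ n < q.2 then true else withinLoopA n rest

def IsWithinQuote (n : Int) (S : String) (quote : String) : Bool :=
  let quote_pair := GetQuotePair S quote
  if quote_pair.length ≠ 0 then withinLoopA n quote_pair else false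

-- ===== PORT B =====
-- B's single counting pass over the occurrences; same fuel bound as A's loop
def altLoop (S quote : String) (n : Int) (fuel : Nat) (i : Int)
    (before after : Int) (at_ : Bool) : Int × Int × Bool :=
  match fuel with
  | 0 => (before, after, at_)
  | f + 1 =>
    if i = -1 then (before, after, at_)
    else if i < n then
      altLoop S quote n f (PySem.Str.findFrom S quote (i + 1)) (before + 1) after at_
    else if i = n then
      altLoop S quote n f (PySem.Str.findFrom S quote (i + 1)) before after true
    else
      altLoop S quote n f (PySem.Str.findFrom S quote (i + 1)) before (after + 1) at_

def IsWithinQuote_alt (n : Int) (S : String) (quote : String) : Bool :=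
  let r := altLoop S quote n (S.toList.length + 2) (PySem.Str.find S quote) 0 0 false
  !r.2.2 && (PySem.Int.mod r.1 2 == 1) && (r.2.1 > 0)

-- ===== PRECONDITION & SPEC =====
def Spec_IsWithinQuote (n : Int) (S : String) (quote : String) (out : Bool) : Prop := out = IsWithinQuote_alt n S quote
instance (n : Int) (S : String) (quote : String) (out : Bool) : Decidable (Spec_IsWithinQuote n S quote out) := by unfold Spec_IsWithinQuote; infer_instance

-- ===== CLAIM (what is proved, stated in full; the proofs are below) =====
def Claim_equal_IsWithinQuote : Prop := ∀ (n : Int) (S : String) (quote : String), Dom_IsWithinQuote n S quote → Spec_IsWithinQuote n S quote (IsWithinQuote n S quote)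

-- ===== LEMMAS AND PROOFS =====

-- pairing two-at-a-time: the value of A's index-fold in GetQuotePair
def pairRec : List Int → List (Int × Int)
  | a :: b :: rest => (a, b) :: pairRec rest
  | _ => []

-- one step of B's counters, as a fold function
def countStep (n : Int) (s : Int × Int × Bool) (p : Int) : Int × Int × Bool :=
  if p < n then (s.1 + 1, s.2.1, s.2.2)
  else if p = n then (s.1, s.2.1, true)
  else (s.1, s.2.1 + 1, s.2.2)

theorem findFrom_next (S quote : String) (k : Int) (hk : 0 ≤ k) :
    PySem.Str.findFrom S quote k = -1 ∨
      (k ≤ PySem.Str.findFrom S quote k ∧ PySem.Str.findFrom S quote k ≤ S.toList.length) := by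
  simp only [PySem.Str.findFrom_eq]
  unfold PySem.Chars.findFrom
  simp only [Int.toNat_natCast, List.take_length]
  have hfind := PySem.Chars.neg_one_le_find (List.drop k.toNat S.toList) quote.toList
  have hle := PySem.Chars.find_le_length (List.drop k.toNat S.toList) quote.toList
  rw [List.length_drop] at hle
  split_ifs <;> omega

theorem findLoopA_acc (S quote : String) :
    ∀ (fuel : Nat) (i : Int) (acc : List Int),
      findLoopA S quote fuel i acc = acc ++ findLoopA S quote fuel i [] := by
  intro fuel
  induction fuel with
  | zero => intro i acc; simp [findLoopA]
  | succ f ih =>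
    intro i acc
    by_cases h : i = -1
    · simp [findLoopA, h]
    · simp only [findLoopA, if_neg h]
      rw [ih _ (acc ++ [i]), ih _ ([] ++ [i])]
      simp

theorem findLoopA_neg (S quote : String) (f : Nat) : findLoopA S quote f (-1) [] = [] := by
  cases f <;> simp [findLoopA]

theorem findLoopA_inv (S quote : String) :
    ∀ (fuel : Nat) (i : Int), 0 ≤ i ∨ i = -1 →
      List.Pairwise (· < ·) (findLoopA S quote fuel i []) ∧
        ∀ x ∈ findLoopA S quote fuel i [], i ≤ x := by
  intro fuel
  induction fuel with
  | zero => intro i _; simp [findLoopA]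
  | succ f ih =>
    intro i hi
    by_cases h : i = -1
    · simp [findLoopA, h]
    · have h0 : 0 ≤ i := by omega
      simp only [findLoopA, if_neg h]
      rw [findLoopA_acc]
      have hnext := findFrom_next S quote (i + 1) (by omega)
      rcases hnext with hn | ⟨hn1, hn2⟩
      · rw [hn, findLoopA_neg]
        simp
      · obtain ⟨hp, hge⟩ := ih (PySem.Str.findFrom S quote (i + 1)) (Or.inl (by omega))
        constructor
        · simp only [List.nil_append, List.singleton_append, List.pairwise_cons]
          exact ⟨fun x hx => by have := hge x hx; omega, hp⟩
        · intro x hx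
          simp only [List.nil_append, List.singleton_append, List.mem_cons] at hx
          rcases hx with rfl | hx
          · omega
          · have := hge x hx; omega

theorem altLoop_eq_fold (S quote : String) (n : Int) :
    ∀ (fuel : Nat) (i : Int) (b a : Int) (t : Bool),
      altLoop S quote n fuel i b a t =
        (findLoopA S quote fuel i []).foldl (countStep n) (b, a, t) := by
  intro fuel
  induction fuel with
  | zero => intro i b a t; simp [altLoop, findLoopA]
  | succ f ih =>
    intro i b a t
    by_cases h : i = -1
    · simp [altLoop, findLoopA, h]
    · simp only [altLoop, findLoopA, if_neg h]
      rw [findLoopA_acc]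
      simp only [List.nil_append, List.singleton_append, List.foldl_cons]
      by_cases h1 : i < n
      · rw [if_pos h1, ih]; simp [countStep, h1]
      · rw [if_neg h1]
        by_cases h2 : i = n
        · rw [if_pos h2, ih]; simp [countStep, h2]
        · rw [if_neg h2, ih]; simp [countStep, h1, h2]

theorem fold_countStep (n : Int) :
    ∀ (ps : List Int) (b a : Int) (t : Bool),
      ps.foldl (countStep n) (b, a, t) =
        (b + (ps.countP (fun p => decide (p < n)) : Int),
         a + (ps.countP (fun p => decide (n < p)) : Int),
         t || ps.any (fun p => p == n)) := by
  intro ps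
  induction ps with
  | nil => intro b a t; simp
  | cons p rest ih =>
    intro b a t
    simp only [List.foldl_cons, List.countP_cons, List.any_cons]
    by_cases h1 : p < n
    · rw [show countStep n (b,a,t) p = (b+1, a, t) by simp [countStep, h1], ih]
      have hp : ¬ (n < p) := by omega
      have hpn : ¬ (p == n) = true := by simp; omega
      simp [h1, hp, hpn]
      omega
    · by_cases h2 : p = n
      · rw [show countStep n (b,a,t) p = (b, a, true) by simp [countStep, h2], ih]
        simp [h2]
      · rw [show countStep n (b,a,t) p = (b, a+1, t) by simp [countStep, h1, h2], ih]
        have hp : n < p := by omega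
        have hb : (p == n) = false := by simp [h2]
        simp [h1, hp, hb]
        omega

theorem foldl_app (f : Int → Int × Int) :
    ∀ (l : List Int) (acc : List (Int × Int)),
      l.foldl (fun pair i => pair ++ [f i]) acc = acc ++ l.map f := by
  intro l
  induction l with
  | nil => simp
  | cons x xs ih => intro acc; simp [ih]

theorem pyRange_zero (m : Nat) :
    PySem.List.pyRange 0 (m : Int) = (List.range m).map (fun (k : Nat) => (k : Int)) := by
  simp only [PySem.List.pyRange]
  split_ifs with h1 h2 h3 h4
  · exact absurd h1 (by norm_num)
  · have hc : (((m : Int) - 0 + 1 - 1) / 1).toNat = m := by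
      simp
    rw [hc]
    simp only [zero_add, one_mul]
  · have hm : m = 0 := by omega
    subst hm; simp
  · norm_num at h2
  · norm_num at h2

theorem getD22 (a b : Int) (rest : List Int) (k : Nat) :
    PySem.List.pyGetD (a :: b :: rest) (2 * ((k + 1 : Nat) : Int)) 0
      = PySem.List.pyGetD rest (2 * (k : Nat)) 0 := by
  rw [show 2 * ((k + 1 : Nat) : Int) = ((2 * k + 2 : Nat) : Int) by push_cast; ring,
      PySem.List.pyGetD_natCast,
      show (2 * (k : Nat) : Int) = ((2 * k : Nat) : Int) by push_cast; ring,
      PySem.List.pyGetD_natCast]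
  simp [List.getD]

theorem getD23 (a b : Int) (rest : List Int) (k : Nat) :
    PySem.List.pyGetD (a :: b :: rest) (2 * ((k + 1 : Nat) : Int) + 1) 0
      = PySem.List.pyGetD rest (2 * (k : Nat) + 1) 0 := by
  rw [show 2 * ((k + 1 : Nat) : Int) + 1 = ((2 * k + 3 : Nat) : Int) by push_cast; ring,
      PySem.List.pyGetD_natCast,
      show (2 * (k : Nat) : Int) + 1 = ((2 * k + 1 : Nat) : Int) by push_cast; ring,
      PySem.List.pyGetD_natCast]
  simp [List.getD]

theorem mapPairs_eq_pairRec :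
    ∀ pos : List Int,
      (List.range (pos.length / 2)).map
        (fun k : Nat => (PySem.List.pyGetD pos (2 * (k : Int)) 0, PySem.List.pyGetD pos (2 * (k : Int) + 1) 0))
        = pairRec pos
  | [] => by simp [pairRec]
  | [a] => by simp [pairRec]
  | a :: b :: rest => by
    have ih := mapPairs_eq_pairRec rest
    have hlen : (a :: b :: rest).length / 2 = rest.length / 2 + 1 := by
      simp [List.length_cons]; omega
    rw [hlen, List.range_succ_eq_map, List.map_cons, List.map_map, pairRec]
    congr 1
    · rw [show 2 * ((0 : Nat) : Int) = ((0 : Nat) : Int) by simp, PySem.List.pyGetD_natCast,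
          show ((0 : Nat) : Int) + 1 = ((1 : Nat) : Int) by simp, PySem.List.pyGetD_natCast]
      rfl
    · rw [← ih]
      apply List.map_congr_left
      intro k _
      simp only [Function.comp_apply, Nat.succ_eq_add_one]
      rw [getD22, getD23]

theorem key (n : Int) :
    ∀ ps : List Int, List.Pairwise (· < ·) ps →
      withinLoopA n (pairRec ps) =
        (!(ps.any (fun p => p == n)) &&
          ((ps.countP (fun p => decide (p < n)) : Int) % 2 == 1) &&
          (((ps.countP (fun p => decide (n < p)) : Int)) > 0))
  | [], _ => by simp [pairRec, withinLoopA]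
  | [a], _ => by
    rcases lt_trichotomy a n with h | h | h
    · simp [pairRec, withinLoopA, List.countP, List.countP.go, h, not_lt.mpr (le_of_lt h)]
    · simp [pairRec, withinLoopA, h]
    · simp [pairRec, withinLoopA, List.countP, List.countP.go, not_lt.mpr (le_of_lt h)]
  | a :: b :: rest, h => by
    have hab : a < b := (List.pairwise_cons.mp h).1 b (by simp)
    have hbrest : ∀ x ∈ rest, b < x := by
      have := (List.pairwise_cons.mp (List.pairwise_cons.mp h).2).1
      exact this
    have hrest : List.Pairwise (· < ·) rest := (List.pairwise_cons.mp (List.pairwise_cons.mp h).2).2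
    have ih := key n rest hrest
    rw [pairRec]
    simp only [withinLoopA, List.any_cons, List.countP_cons]
    by_cases hcase : a < n ∧ n < b
    · -- LHS true
      rw [if_pos (by exact ⟨hcase.1, hcase.2⟩)]
      have han : (a == n) = false := by simp; omega
      have hbn : (b == n) = false := by simp; omega
      have hrn : (rest.any fun p => p == n) = false := by
        simp only [List.any_eq_false]
        intro x hx
        have := hbrest x hx
        simp; omega
      have hc1a : decide (a < n) = true := by simp [hcase.1]
      have hc1b : decide (b < n) = false := by simp; omega
      have hcrest1 : rest.countP (fun p => decide (p < n)) = 0 := by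
        rw [List.countP_eq_zero]
        intro x hx; have := hbrest x hx; simp; omega
      have hc2b : decide (n < b) = true := by simp [hcase.2]
      simp [han, hbn, hrn, hc1a, hc1b, hcrest1, hc2b]
      omega
    · rw [if_neg hcase, ih]
      by_cases han : a < n
      case neg =>
        -- n ≤ a: both sides are false
        have hca : decide (a < n) = false := by simp; omega
        have hcb : decide (b < n) = false := by simp; omega
        have hcr : rest.countP (fun p => decide (p < n)) = 0 := by
          rw [List.countP_eq_zero]; intro x hx; have := hbrest x hx; simp; omega
        simp [hca, hcb, hcr]
      case pos =>
       rcases lt_trichotomy n b with hnb | hnb | hnb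
       · exact absurd ⟨han, hnb⟩ hcase
       · -- n = b: quote at n, both sides false
         subst hnb
         have hcr : rest.countP (fun p => decide (p < n)) = 0 := by
           rw [List.countP_eq_zero]; intro x hx; have := hbrest x hx; simp; omega
         simp [hcr]
       · -- n > b
         have han' : (a == n) = false := by simp; omega
         have hbn : (b == n) = false := by simp; omega
         have hc1a : decide (a < n) = true := by simp; omega
         have hc1b : decide (b < n) = true := by simp; omega
         have hc2a : decide (n < a) = false := by simp; omega
         have hc2b : decide (n < b) = false := by simp; omega
         simp [han', hbn, hc1a, hc1b, hc2a, hc2b]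
         have hp : ((List.countP (fun p => decide (p < n)) rest : Int) + 1 + 1) % 2
             = (List.countP (fun p => decide (p < n)) rest : Int) % 2 := by omega
         rw [hp]

theorem pairsA_eq_pairRec (pos : List Int) :
    (PySem.List.pyRange 0 (pos.length / 2 : Nat)).foldl
      (fun pair i => pair ++ [(PySem.List.pyGetD pos (2 * i) 0, PySem.List.pyGetD pos (2 * i + 1) 0)]) []
      = pairRec pos := by
  rw [pyRange_zero, foldl_app, List.nil_append, List.map_map]
  exact mapPairs_eq_pairRec pos

theorem withinLoopA_of_guard (n : Int) (qp : List (Int × Int)) :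
    (if qp.length ≠ 0 then withinLoopA n qp else false) = withinLoopA n qp := by
  cases qp <;> simp [withinLoopA]

-- ===== VERDICT (by name: the statement is the Claim_ definition above) =====
theorem IsWithinQuote_spec : Claim_equal_IsWithinQuote := by
  intro n S quote _
  show IsWithinQuote n S quote = IsWithinQuote_alt n S quote
  have hinit : 0 ≤ PySem.Str.find S quote ∨ PySem.Str.find S quote = -1 := by
    have := PySem.Chars.neg_one_le_find S.toList quote.toList
    simp only [PySem.Str.find_eq]
    omega
  have hpw : List.Pairwise (· < ·)
      (findLoopA S quote (S.toList.length + 2) (PySem.Str.find S quote) []) :=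
    (findLoopA_inv S quote (S.toList.length + 2) (PySem.Str.find S quote) hinit).1
  show (let quote_pair := GetQuotePair S quote
        if quote_pair.length ≠ 0 then withinLoopA n quote_pair else false) = _
  rw [show GetQuotePair S quote = pairRec (GetQuotePosition S quote) from
        pairsA_eq_pairRec (GetQuotePosition S quote),
      withinLoopA_of_guard, GetQuotePosition, key n _ hpw]
  show _ = (let r := altLoop S quote n (S.toList.length + 2) (PySem.Str.find S quote) 0 0 false
            !r.2.2 && (PySem.Int.mod r.1 2 == 1) && (r.2.1 > 0))
  rw [altLoop_eq_fold, fold_countStep]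
  simp
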